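-- pv_equiv track=rewrite | github.com/lgapstuff/nba-live | app/domain/value_objects/team_names.py | get_team_abbreviation
-- ===== SOURCE A (Python) =====
-- from typing import Dict
--
-- NBA_TEAM_NAMES: Dict[str, str] = {
--     # Eastern Conference
--     "ATL": "Atlanta Hawks",
--     "BOS": "Boston Celtics",
--     "BKN": "Brooklyn Nets",
--     "CHA": "Charlotte Hornets",
--     "CHI": "Chicago Bulls",
--     "CLE": "Cleveland Cavaliers",
--     "DET": "Detroit Pistons",
--     "IND": "Indiana Pacers",
--     "MIA": "Miami Heat",
--     "MIL": "Milwaukee Bucks",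
--     "NY": "New York Knicks",
--     "ORL": "Orlando Magic",
--     "PHI": "Philadelphia 76ers",
--     "TOR": "Toronto Raptors",
--     "WAS": "Washington Wizards",
--
--     # Western Conference
--     "DAL": "Dallas Mavericks",
--     "DEN": "Denver Nuggets",
--     "GS": "Golden State Warriors",
--     "HOU": "Houston Rockets",
--     "LAC": "Los Angeles Clippers",
--     "LAL": "Los Angeles Lakers",
--     "MEM": "Memphis Grizzlies",
--     "MIN": "Minnesota Timberwolves",
--     "NO": "New Orleans Pelicans",
--     "OKC": "Oklahoma City Thunder",
--     "PHO": "Phoenix Suns",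
--     "POR": "Portland Trail Blazers",
--     "SAC": "Sacramento Kings",
--     "SA": "San Antonio Spurs",
--     "UTA": "Utah Jazz",
--
--     # Variaciones comunes
--     "GSW": "Golden State Warriors",  # Alternativa para GS
--     "NOP": "New Orleans Pelicans",  # Alternativa para NO
--     "PHX": "Phoenix Suns",  # Alternativa para PHO
--     "NYK": "New York Knicks",  # Alternativa para NY
-- }
--
-- def get_team_abbreviation(full_name: str) -> str:
--     """
--     Get team abbreviation from full team name.
--
--     Args:
--         full_name: Full team name (e.g., "Los Angeles Lakers", "Cleveland Cavaliers")
--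
--     Returns:
--         Team abbreviation or empty string if not found
--     """
--     if not full_name:
--         return ""
--
--     # Normalize team name (case insensitive, remove extra spaces)
--     normalized_name = " ".join(full_name.strip().split())
--
--     # Create reverse mapping
--     for abbrev, team_name in NBA_TEAM_NAMES.items():
--         if team_name.lower() == normalized_name.lower():
--             return abbrev
--
--     # Try partial matching for cases like "Los Angeles Lakers" vs "Lakers"
--     normalized_lower = normalized_name.lower()
--     for abbrev, team_name in NBA_TEAM_NAMES.items():
--         team_name_lower = team_name.lower()
--         # Check if normalized_name contains key words from team_name
--         team_keywords = [word for word in team_name_lower.split() if len(word) > 3]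
--         if team_keywords and all(keyword in normalized_lower for keyword in team_keywords):
--             return abbrev
--
--     return ""
-- ===== SOURCE B (Python) =====
-- from typing import Dict
--
-- NBA_TEAM_NAMES: Dict[str, str] = {
--     "ATL": "Atlanta Hawks", "BOS": "Boston Celtics", "BKN": "Brooklyn Nets",
--     "CHA": "Charlotte Hornets", "CHI": "Chicago Bulls", "CLE": "Cleveland Cavaliers",
--     "DET": "Detroit Pistons", "IND": "Indiana Pacers", "MIA": "Miami Heat",
--     "MIL": "Milwaukee Bucks", "NY": "New York Knicks", "ORL": "Orlando Magic",
--     "PHI": "Philadelphia 76ers", "TOR": "Toronto Raptors", "WAS": "Washington Wizards",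
--     "DAL": "Dallas Mavericks", "DEN": "Denver Nuggets", "GS": "Golden State Warriors",
--     "HOU": "Houston Rockets", "LAC": "Los Angeles Clippers", "LAL": "Los Angeles Lakers",
--     "MEM": "Memphis Grizzlies", "MIN": "Minnesota Timberwolves", "NO": "New Orleans Pelicans",
--     "OKC": "Oklahoma City Thunder", "PHO": "Phoenix Suns", "POR": "Portland Trail Blazers",
--     "SAC": "Sacramento Kings", "SA": "San Antonio Spurs", "UTA": "Utah Jazz",
--     "GSW": "Golden State Warriors", "NOP": "New Orleans Pelicans",
--     "PHX": "Phoenix Suns", "NYK": "New York Knicks",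
-- }
--
--
-- def get_team_abbreviation(full_name: str) -> str:
--     """Single pass: return on the first exact match, remember the first partial match."""
--     if not full_name:
--         return ""
--     normalized_lower = " ".join(full_name.strip().split()).lower()
--     partial = None
--     for abbrev, team_name in NBA_TEAM_NAMES.items():
--         team_name_lower = team_name.lower()
--         if team_name_lower == normalized_lower:
--             return abbrev
--         if partial is None:
--             keywords = [w for w in team_name_lower.split() if len(w) > 3]
--             if keywords and all(k in normalized_lower for k in keywords):
--                 partial = abbrev
--     return partial if partial is not None else ""
-- ===== Notes on version B (the rewrite author's own statement) =====
-- stated objective: simpler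
-- what changed: Replaces A's two separate scans of NBA_TEAM_NAMES (exact-match pass, then partial-match pass) with one scan that returns immediately on an exact match while remembering the first partial match in an accumulator.
import Mathlib
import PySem

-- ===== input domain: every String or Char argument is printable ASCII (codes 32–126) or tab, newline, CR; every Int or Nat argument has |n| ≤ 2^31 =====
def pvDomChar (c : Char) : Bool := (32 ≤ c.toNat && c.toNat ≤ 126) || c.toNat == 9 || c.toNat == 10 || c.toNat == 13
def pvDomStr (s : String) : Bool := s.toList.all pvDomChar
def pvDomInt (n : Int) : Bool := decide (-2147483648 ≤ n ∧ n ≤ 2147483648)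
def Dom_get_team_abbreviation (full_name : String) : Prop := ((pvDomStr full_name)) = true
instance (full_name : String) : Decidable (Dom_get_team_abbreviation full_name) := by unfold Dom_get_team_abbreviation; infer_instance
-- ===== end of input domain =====

-- B replaces A's two scans of the table by one scan with a pending-partial accumulator (objective: simpler).

-- ===== PORT A =====
-- NBA_TEAM_NAMES as an association list in insertion order
def nbaTeamNames : List (String × String) := [
  ("ATL", "Atlanta Hawks"), ("BOS", "Boston Celtics"), ("BKN", "Brooklyn Nets"),
  ("CHA", "Charlotte Hornets"), ("CHI", "Chicago Bulls"), ("CLE", "Cleveland Cavaliers"),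
  ("DET", "Detroit Pistons"), ("IND", "Indiana Pacers"), ("MIA", "Miami Heat"),
  ("MIL", "Milwaukee Bucks"), ("NY", "New York Knicks"), ("ORL", "Orlando Magic"),
  ("PHI", "Philadelphia 76ers"), ("TOR", "Toronto Raptors"), ("WAS", "Washington Wizards"),
  ("DAL", "Dallas Mavericks"), ("DEN", "Denver Nuggets"), ("GS", "Golden State Warriors"),
  ("HOU", "Houston Rockets"), ("LAC", "Los Angeles Clippers"), ("LAL", "Los Angeles Lakers"),
  ("MEM", "Memphis Grizzlies"), ("MIN", "Minnesota Timberwolves"), ("NO", "New Orleans Pelicans"),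
  ("OKC", "Oklahoma City Thunder"), ("PHO", "Phoenix Suns"), ("POR", "Portland Trail Blazers"),
  ("SAC", "Sacramento Kings"), ("SA", "San Antonio Spurs"), ("UTA", "Utah Jazz"),
  ("GSW", "Golden State Warriors"), ("NOP", "New Orleans Pelicans"),
  ("PHX", "Phoenix Suns"), ("NYK", "New York Knicks")]

-- A's first loop: return ab on exact (lower-cased) match
def pyAExactLoop (nl : String) : List (String × String) → Option String
  | [] => none
  | (ab, team_name) :: rest =>
    if PySem.Str.lower team_name == nl then some ab else pyAExactLoop nl rest

-- A's second loop: return ab when all keywords (words longer than 3) occur in normalized_lower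
def pyAPartialLoop (nl : String) : List (String × String) → Option String
  | [] => none
  | (ab, team_name) :: rest =>
    let team_name_lower := PySem.Str.lower team_name
    let team_keywords := (PySem.Str.split₀ team_name_lower).filter (fun w => 3 < PySem.Str.len w)
    if (!team_keywords.isEmpty) && team_keywords.all (fun k => PySem.Str.isIn k nl) then some ab
    else pyAPartialLoop nl rest

def get_team_abbreviation (full_name : String) : String :=
  if full_name == "" then ""
  else
    let normalized_name := PySem.Str.join " " (PySem.Str.split₀ (PySem.Str.strip full_name))
    match pyAExactLoop (PySem.Str.lower normalized_name) nbaTeamNames with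
    | some ab => ab
    | none =>
      let normalized_lower := PySem.Str.lower normalized_name
      match pyAPartialLoop normalized_lower nbaTeamNames with
      | some ab => ab
      | none => ""

-- ===== PORT B =====
-- B's single loop: return on exact match, remember the first partial match in `partialAcc`
def pyBLoop (nl : String) (partialAcc : Option String) : List (String × String) → Option String
  | [] => partialAcc
  | (ab, team_name) :: rest =>
    let team_name_lower := PySem.Str.lower team_name
    if team_name_lower == nl then some ab
    else
      let partialAcc' :=
        match partialAcc with
        | some p => some p
        | none =>
          let keywords := (PySem.Str.split₀ team_name_lower).filter (fun w => 3 < PySem.Str.len w)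
          if (!keywords.isEmpty) && keywords.all (fun k => PySem.Str.isIn k nl) then some ab
          else none
      pyBLoop nl partialAcc' rest

def get_team_abbreviation_alt (full_name : String) : String :=
  if full_name == "" then ""
  else
    let normalized_lower := PySem.Str.lower (PySem.Str.join " " (PySem.Str.split₀ (PySem.Str.strip full_name)))
    match pyBLoop normalized_lower none nbaTeamNames with
    | some ab => ab
    | none => ""

-- ===== PRECONDITION & SPEC =====
def Spec_get_team_abbreviation (full_name : String) (out : String) : Prop := out = get_team_abbreviation_alt full_name
instance (full_name : String) (out : String) : Decidable (Spec_get_team_abbreviation full_name out) := by unfold Spec_get_team_abbreviation; infer_instance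

-- ===== CLAIM (what is proved, stated in full; the proofs are below) =====
def Claim_equal_get_team_abbreviation : Prop := ∀ (full_name : String), Dom_get_team_abbreviation full_name → Spec_get_team_abbreviation full_name (get_team_abbreviation full_name)

-- ===== LEMMAS AND PROOFS =====

-- B's single scan equals: first exact match, else the pending partial, else A's partial scan.
theorem pyBLoop_eq (nl : String) (l : List (String × String)) :
    ∀ acc : Option String,
      pyBLoop nl acc l =
        match pyAExactLoop nl l with
        | some a => some a
        | none => match acc with
          | some p => some p
          | none => pyAPartialLoop nl l := by
  induction l with
  | nil => intro acc; cases acc <;> rfl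
  | cons hd rest ih =>
    intro acc
    obtain ⟨ab, team_name⟩ := hd
    simp only [pyBLoop, pyAExactLoop, pyAPartialLoop]
    by_cases hex : (PySem.Str.lower team_name == nl) = true
    · simp [hex]
    · simp only [Bool.not_eq_true] at hex
      simp only [hex, Bool.false_eq_true, if_false]
      rw [ih]
      cases acc with
      | some p => rfl
      | none =>
        by_cases hp : ((!((PySem.Str.split₀ (PySem.Str.lower team_name)).filter
              (fun w => 3 < PySem.Str.len w)).isEmpty) &&
            ((PySem.Str.split₀ (PySem.Str.lower team_name)).filter
              (fun w => 3 < PySem.Str.len w)).all (fun k => PySem.Str.isIn k nl)) = true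
        · simp only [hp, if_true]
        · simp only [Bool.not_eq_true] at hp
          simp only [hp, Bool.false_eq_true, if_false]

-- ===== VERDICT (by name: the statement is the Claim_ definition above) =====
theorem get_team_abbreviation_spec : Claim_equal_get_team_abbreviation := by
  intro full_name _
  unfold Spec_get_team_abbreviation get_team_abbreviation get_team_abbreviation_alt
  by_cases h : (full_name == "") = true
  · rw [if_pos h, if_pos h]
  · rw [if_neg h, if_neg h]
    simp only [pyBLoop_eq]
    cases pyAExactLoop (PySem.Str.lower (PySem.Str.join " " (PySem.Str.split₀ (PySem.Str.strip full_name)))) nbaTeamNames with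
    | some a => rfl
    | none =>
      cases pyAPartialLoop (PySem.Str.lower (PySem.Str.join " " (PySem.Str.split₀ (PySem.Str.strip full_name)))) nbaTeamNames <;> rfl
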